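-- pv_equiv track=rewrite | github.com/ccollado7/UNSAM---Python | Revision de Pares/Semana N°4/Caso 1/04-1-gol-envido.py-cin-2020-09-02_12.05.34.py | es_33
-- ===== SOURCE A (Python) =====
-- def es_33(mano):
--     index_siete = []
--     index_seis = []
--     for carta in mano:
--         if carta[0] == 7:
--             index_siete.append(mano.index(carta))
--         elif carta[0] == 6:
--             index_seis.append(mano.index(carta))
--     if len(index_seis)>0 and len(index_siete)>0:
--         for indice_7 in index_siete:
--             for indice_6 in index_seis:
--                 if mano[indice_7][1] == mano[indice_6][1]:
--                     treintaytres = True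
--                 else:
--                     treintaytres = False
--     else:
--         treintaytres = False
--
--     return treintaytres
-- ===== SOURCE B (Python) =====
-- def es_33(mano):
--     siete = None
--     seis = None
--     for carta in mano:
--         if carta[0] == 7:
--             siete = carta
--         elif carta[0] == 6:
--             seis = carta
--     return siete is not None and seis is not None and siete[1] == seis[1]
-- ===== Notes on version B (the rewrite author's own statement) =====
-- stated objective: simpler
-- what changed: Replaced A's two index lists, repeated mano.index scans and O(n^2) nested comparison loop by a single pass that keeps only the most recent 7-card and 6-card and compares their suits at the end.
import Mathlib
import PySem

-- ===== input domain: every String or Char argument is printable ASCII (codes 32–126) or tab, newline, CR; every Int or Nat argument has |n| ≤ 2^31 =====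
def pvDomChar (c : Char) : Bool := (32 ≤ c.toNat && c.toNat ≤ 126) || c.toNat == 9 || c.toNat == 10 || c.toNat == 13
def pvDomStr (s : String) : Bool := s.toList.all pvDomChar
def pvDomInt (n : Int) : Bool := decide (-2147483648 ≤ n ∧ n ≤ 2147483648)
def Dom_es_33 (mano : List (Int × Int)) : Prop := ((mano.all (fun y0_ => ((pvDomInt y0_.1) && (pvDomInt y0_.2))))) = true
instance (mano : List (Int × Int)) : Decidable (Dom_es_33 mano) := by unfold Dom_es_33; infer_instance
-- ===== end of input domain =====

-- B replaces A's two index lists and O(n^2) nested comparison loop by a single pass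
-- keeping only the last 7-card and last 6-card (objective: simpler).

-- ===== PORT A =====
-- one loop step of A: append mano.index(carta) to the 7-list or the 6-list
-- (the .getD 0 only totalises index?: carta is always a member, so index? is some)
def pvStepA (mano : List (Int × Int)) (st : List Nat × List Nat) (carta : Int × Int) :
    List Nat × List Nat :=
  if carta.1 == 7 then (st.1 ++ [(PySem.List.index? mano carta).getD 0], st.2)
  else if carta.1 == 6 then (st.1, st.2 ++ [(PySem.List.index? mano carta).getD 0])
  else st

-- the final if of A: nested for-loops, each iteration overwrites treintaytres,
-- so the accumulator is ignored
def pvFinishA (mano : List (Int × Int)) (st : List Nat × List Nat) : Bool :=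
  if st.2.length > 0 && st.1.length > 0 then
    st.1.foldl (fun (t : Bool) (i7 : Nat) =>
      st.2.foldl (fun (_ : Bool) (i6 : Nat) =>
        decide ((PySem.List.pyGet? mano ((i7 : Nat) : Int)).map Prod.snd
              = (PySem.List.pyGet? mano ((i6 : Nat) : Int)).map Prod.snd)) t) false
  else false

def es_33 (mano : List (Int × Int)) : Bool :=
  pvFinishA mano (mano.foldl (pvStepA mano) ([], []))

-- ===== PORT B =====
-- one loop step of B: remember the most recent 7-card and 6-card
def pvStepB (st : Option (Int × Int) × Option (Int × Int)) (carta : Int × Int) :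
    Option (Int × Int) × Option (Int × Int) :=
  if carta.1 == 7 then (some carta, st.2)
  else if carta.1 == 6 then (st.1, some carta)
  else st

def pvFinishB (st : Option (Int × Int) × Option (Int × Int)) : Bool :=
  match st.1, st.2 with
  | some s7, some s6 => s7.2 == s6.2
  | _, _ => false

def es_33_alt (mano : List (Int × Int)) : Bool :=
  pvFinishB (mano.foldl pvStepB (none, none))

-- ===== PRECONDITION & SPEC =====
def Spec_es_33 (mano : List (Int × Int)) (out : Bool) : Prop := out = es_33_alt mano
instance (mano : List (Int × Int)) (out : Bool) : Decidable (Spec_es_33 mano out) := by unfold Spec_es_33; infer_instance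

-- ===== CLAIM (what is proved, stated in full; the proofs are below) =====
def Claim_equal_es_33 : Prop := ∀ (mano : List (Int × Int)), Dom_es_33 mano → Spec_es_33 mano (es_33 mano)

-- ===== LEMMAS AND PROOFS =====

/-- Relation between A's list of indices and B's remembered card:
the list is empty iff no card was remembered, and the last index points (in mano)
at a card equal to the remembered one. -/
def pvR (mano : List (Int × Int)) (l : List Nat) (o : Option (Int × Int)) : Prop :=
  match o with
  | none => l = []
  | some c => ∃ j, l.getLast? = some j ∧ PySem.List.pyGet? mano (j : Int) = some c

lemma pv_index_get (mano : List (Int × Int)) (c : Int × Int) (hc : c ∈ mano) :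
    PySem.List.pyGet? mano (((PySem.List.index? mano c).getD 0 : Nat) : Int) = some c := by
  have hs : (PySem.List.index? mano c).isSome := (PySem.List.index?_isSome_iff mano c).2 hc
  obtain ⟨k, hk⟩ := Option.isSome_iff_exists.1 hs
  obtain ⟨hlt, hget, -⟩ := PySem.List.getElem_of_index?_eq_some hk
  rw [hk]
  simp [PySem.List.pyGet?_natCast, Option.getD, List.getElem?_eq_getElem hlt, hget]

lemma pv_inv (mano : List (Int × Int)) :
    ∀ (s p : List (Int × Int)) (i7 i6 : List Nat) (o7 o6 : Option (Int × Int)),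
    mano = p ++ s → pvR mano i7 o7 → pvR mano i6 o6 →
    pvR mano (s.foldl (pvStepA mano) (i7, i6)).1 (s.foldl pvStepB (o7, o6)).1 ∧
    pvR mano (s.foldl (pvStepA mano) (i7, i6)).2 (s.foldl pvStepB (o7, o6)).2 := by
  intro s
  induction s with
  | nil => intro p i7 i6 o7 o6 _ h7 h6; exact ⟨h7, h6⟩
  | cons c s ih =>
    intro p i7 i6 o7 o6 hm h7 h6
    have hc : c ∈ mano := by rw [hm]; simp
    have hm' : mano = (p ++ [c]) ++ s := by rw [hm]; simp
    simp only [List.foldl_cons]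
    by_cases h7c : c.1 = 7
    · have e1 : pvStepA mano (i7, i6) c = (i7 ++ [(PySem.List.index? mano c).getD 0], i6) := by
        simp [pvStepA, h7c]
      have e2 : pvStepB (o7, o6) c = (some c, o6) := by simp [pvStepB, h7c]
      rw [e1, e2]
      refine ih (p ++ [c]) _ _ _ _ hm' ?_ h6
      exact ⟨(PySem.List.index? mano c).getD 0, by simp, pv_index_get mano c hc⟩
    · by_cases h6c : c.1 = 6
      · have e1 : pvStepA mano (i7, i6) c = (i7, i6 ++ [(PySem.List.index? mano c).getD 0]) := by
          simp [pvStepA, h6c]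
        have e2 : pvStepB (o7, o6) c = (o7, some c) := by simp [pvStepB, h6c]
        rw [e1, e2]
        refine ih (p ++ [c]) _ _ _ _ hm' h7 ?_
        exact ⟨(PySem.List.index? mano c).getD 0, by simp, pv_index_get mano c hc⟩
      · have e1 : pvStepA mano (i7, i6) c = (i7, i6) := by simp [pvStepA, h7c, h6c]
        have e2 : pvStepB (o7, o6) c = (o7, o6) := by simp [pvStepB, h7c, h6c]
        rw [e1, e2]
        exact ih (p ++ [c]) _ _ _ _ hm' h7 h6

/-- A fold whose body ignores the accumulator returns the value at the last element. -/
lemma pv_foldl_last {α β : Type} (g : α → β) (l : List α) (j : α)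
    (h : l.getLast? = some j) : ∀ a : β, l.foldl (fun _ x => g x) a = g j := by
  induction l with
  | nil => simp at h
  | cons x t ih =>
    intro a
    cases t with
    | nil => simp at h; simp [h]
    | cons y t' =>
      have h' : (y :: t').getLast? = some j := by
        simpa [List.getLast?_cons_cons] using h
      simp only [List.foldl_cons]
      exact ih h' (g x)

-- ===== VERDICT (by name: the statement is the Claim_ definition above) =====
theorem es_33_spec : Claim_equal_es_33 := by
  unfold Claim_equal_es_33
  intro mano _
  unfold Spec_es_33 es_33 es_33_alt
  have h := pv_inv mano mano [] [] [] none none (by simp) rfl rfl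
  set stA := mano.foldl (pvStepA mano) ([], []) with hA
  set stB := mano.foldl pvStepB (none, none) with hB
  obtain ⟨h7, h6⟩ := h
  match hb1 : stB.1, hb2 : stB.2 with
  | none, _ =>
    rw [hb1] at h7
    simp only [pvR] at h7
    simp [pvFinishA, pvFinishB, h7, hb1]
  | some s7, none =>
    rw [hb2] at h6
    simp only [pvR] at h6
    simp [pvFinishA, pvFinishB, h6, hb1, hb2]
  | some s7, some s6 =>
    rw [hb1] at h7; rw [hb2] at h6
    obtain ⟨j7, hj7, hg7⟩ := h7
    obtain ⟨j6, hj6, hg6⟩ := h6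
    have hne7 : stA.1 ≠ [] := by intro e; rw [e] at hj7; simp at hj7
    have hne6 : stA.2 ≠ [] := by intro e; rw [e] at hj6; simp at hj6
    have hcond : (stA.2.length > 0 && stA.1.length > 0) = true := by
      simp [List.length_pos_iff, hne6, hne7]
    unfold pvFinishA
    rw [if_pos hcond]
    have inner : ∀ (i7 : Nat) (t : Bool),
        stA.2.foldl (fun (_ : Bool) (i6 : Nat) =>
          decide ((PySem.List.pyGet? mano ((i7 : Nat) : Int)).map Prod.snd
                = (PySem.List.pyGet? mano ((i6 : Nat) : Int)).map Prod.snd)) t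
        = decide ((PySem.List.pyGet? mano ((i7 : Nat) : Int)).map Prod.snd
                = (PySem.List.pyGet? mano ((j6 : Nat) : Int)).map Prod.snd) := by
      intro i7 t
      exact pv_foldl_last _ _ _ hj6 t
    have outer : stA.1.foldl (fun (t : Bool) (i7 : Nat) =>
        stA.2.foldl (fun (_ : Bool) (i6 : Nat) =>
          decide ((PySem.List.pyGet? mano ((i7 : Nat) : Int)).map Prod.snd
                = (PySem.List.pyGet? mano ((i6 : Nat) : Int)).map Prod.snd)) t) false
        = decide ((PySem.List.pyGet? mano ((j7 : Nat) : Int)).map Prod.snd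
                = (PySem.List.pyGet? mano ((j6 : Nat) : Int)).map Prod.snd) := by
      have e : (fun (t : Bool) (i7 : Nat) =>
            stA.2.foldl (fun (_ : Bool) (i6 : Nat) =>
              decide ((PySem.List.pyGet? mano ((i7 : Nat) : Int)).map Prod.snd
                    = (PySem.List.pyGet? mano ((i6 : Nat) : Int)).map Prod.snd)) t)
          = fun (_ : Bool) (i7 : Nat) =>
              decide ((PySem.List.pyGet? mano ((i7 : Nat) : Int)).map Prod.snd
                    = (PySem.List.pyGet? mano ((j6 : Nat) : Int)).map Prod.snd) := by
        funext t i7; exact inner i7 t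
      rw [e]
      exact pv_foldl_last _ _ _ hj7 false
    rw [outer, hg7, hg6]
    simp [pvFinishB, hb1, hb2, beq_eq_decide]
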